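-- pv_equiv track=rewrite | github.com/BrettRey/erdos-problem-993 | scripts/family_miner_kernel_scaffold.py | sign_mix_score
-- ===== SOURCE A (Python) =====
-- from typing import Dict, List, Tuple, Optional, Iterable, Any
--
-- def sign_mix_score(int_list: List[int]) -> Tuple[bool, int]:
--     # returns (mixed?, sign_changes ignoring zeros)
--     s = [0 if v == 0 else (1 if v > 0 else -1) for v in int_list]
--     nonzero = [v for v in s if v != 0]
--     if not nonzero:
--         return (False, 0)
--     mixed = (min(nonzero) < 0) and (max(nonzero) > 0)
--     changes = 0
--     for i in range(1, len(nonzero)):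
--         if nonzero[i] != nonzero[i-1]:
--             changes += 1
--     return mixed, changes
-- ===== SOURCE B (Python) =====
-- def sign_mix_score(int_list):
--     # returns (mixed?, sign_changes ignoring zeros)
--     prev = None
--     seen_pos = False
--     seen_neg = False
--     changes = 0
--     for v in int_list:
--         if v == 0:
--             continue
--         s = 1 if v > 0 else -1
--         if s > 0:
--             seen_pos = True
--         else:
--             seen_neg = True
--         if prev is not None and s != prev:
--             changes += 1
--         prev = s
--     return (seen_pos and seen_neg, changes)
-- ===== Notes on version B (the rewrite author's own statement) =====
-- stated objective: simpler
-- what changed: Replaced the three intermediate lists plus min/max scan and index loop by a single accumulator pass maintaining the last nonzero sign, two seen-sign flags and a change counter; 'mixed' is derived from the flags instead of min/max.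
import Mathlib
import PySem

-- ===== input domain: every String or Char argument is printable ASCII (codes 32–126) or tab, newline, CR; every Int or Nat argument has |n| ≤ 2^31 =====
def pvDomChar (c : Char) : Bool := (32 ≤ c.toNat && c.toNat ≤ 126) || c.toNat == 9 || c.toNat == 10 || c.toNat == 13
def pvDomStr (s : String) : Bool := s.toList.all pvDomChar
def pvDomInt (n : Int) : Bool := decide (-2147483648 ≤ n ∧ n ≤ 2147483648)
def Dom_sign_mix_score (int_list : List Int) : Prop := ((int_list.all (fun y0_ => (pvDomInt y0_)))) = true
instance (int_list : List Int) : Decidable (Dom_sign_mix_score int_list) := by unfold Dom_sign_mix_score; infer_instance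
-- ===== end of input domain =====

-- B replaces A's intermediate sign/nonzero lists, min/max scan and index loop by one
-- accumulator pass (last nonzero sign, two seen-sign flags, change counter): simpler, O(1) extra space.

-- ===== PORT A =====
-- the comprehension's sign expression: 0 if v == 0 else (1 if v > 0 else -1)
def pvSign (v : Int) : Int := if v = 0 then 0 else if 0 < v then 1 else -1

def sign_mix_score (int_list : List Int) : Bool × Int :=
  let s := int_list.map pvSign
  let nonzero := s.filter (fun v => v ≠ 0)
  if nonzero = [] then (false, 0)
  else
    let mixed := decide ((PySem.List.min? nonzero (fun x => x)).getD 0 < 0)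
              && decide (0 < (PySem.List.max? nonzero (fun x => x)).getD 0)
    let changes := (PySem.List.pyRange 1 (PySem.List.len nonzero) 1).foldl
      (fun c i => if PySem.List.pyGetD nonzero i 0 ≠ PySem.List.pyGetD nonzero (i - 1) 0
                  then c + 1 else c) (0 : Int)
    (mixed, changes)

-- ===== PORT B =====
-- one iteration of Source B's loop body (the state is (prev, seen_pos, seen_neg, changes))
def pvAltStep (st : Option Int × Bool × Bool × Int) (v : Int) : Option Int × Bool × Bool × Int :=
  if v = 0 then st
  else
    let s : Int := if 0 < v then 1 else -1
    let sp := if 0 < s then true else st.2.1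
    let sn := if 0 < s then st.2.2.1 else true
    let ch := match st.1 with
      | some p => if s ≠ p then st.2.2.2 + 1 else st.2.2.2
      | none => st.2.2.2
    (some s, sp, sn, ch)

def sign_mix_score_alt (int_list : List Int) : Bool × Int :=
  let st := int_list.foldl pvAltStep (none, false, false, 0)
  (st.2.1 && st.2.2.1, st.2.2.2)

-- ===== PRECONDITION & SPEC =====
def Spec_sign_mix_score (int_list : List Int) (out : Bool × Int) : Prop := out = sign_mix_score_alt int_list
instance (int_list : List Int) (out : Bool × Int) : Decidable (Spec_sign_mix_score int_list out) := by unfold Spec_sign_mix_score; infer_instance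

-- ===== CLAIM (what is proved, stated in full; the proofs are below) =====
def Claim_equal_sign_mix_score : Prop := ∀ (int_list : List Int), Dom_sign_mix_score int_list → Spec_sign_mix_score int_list (sign_mix_score int_list)

-- ===== LEMMAS AND PROOFS =====

-- number of adjacent sign changes, the common value of A's index loop and B's counter
def pvAdj : List Int → Int
  | [] => 0
  | [_] => 0
  | a :: b :: t => (if b ≠ a then 1 else 0) + pvAdj (b :: t)

lemma pvAdj_short (xs : List Int) (h : xs.length ≤ 1) : pvAdj xs = 0 := by
  match xs, h with
  | [], _ => rfl
  | [_], _ => rfl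

-- A's index loop from position k+1 counts the adjacent changes of xs.drop k
lemma pvLoopA (xs : List Int) : ∀ (m k : Nat) (c0 : Int), xs.length - k = m →
    (PySem.List.pyRange ((k : Int) + 1) ((xs.length : Int)) 1).foldl
      (fun c i => if PySem.List.pyGetD xs i 0 ≠ PySem.List.pyGetD xs (i - 1) 0
                  then c + 1 else c) c0
    = c0 + pvAdj (xs.drop k) := by
  intro m
  induction m with
  | zero =>
    intro k c0 hm
    have hk : xs.length ≤ k := by omega
    rw [PySem.List.pyRange_one_eq_nil (by exact_mod_cast by omega)]
    rw [List.drop_eq_nil_of_le hk]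
    simp [pvAdj]
  | succ m ih =>
    intro k c0 hm
    have hk : k < xs.length := by omega
    by_cases hk1 : k + 1 < xs.length
    · rw [PySem.List.pyRange_one_cons (a := (k : Int) + 1) (by exact_mod_cast by omega)]
      rw [List.foldl_cons]
      have e1 : PySem.List.pyGetD xs ((k : Int) + 1) 0 = xs.getD (k + 1) 0 := by
        rw [show (k : Int) + 1 = ((k + 1 : Nat) : Int) by push_cast; ring,
          PySem.List.pyGetD_natCast]
      have e2 : PySem.List.pyGetD xs ((k : Int) + 1 - 1) 0 = xs.getD k 0 := by
        rw [show (k : Int) + 1 - 1 = ((k : Nat) : Int) by ring, PySem.List.pyGetD_natCast]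
      rw [e1, e2]
      have hrec := ih (k + 1)
        (if xs.getD (k + 1) 0 ≠ xs.getD k 0 then c0 + 1 else c0) (by omega)
      rw [show ((k + 1 : Nat) : Int) + 1 = ((k : Int) + 1 + 1) by push_cast; ring] at hrec
      rw [hrec]
      have hd1 : xs.drop k = xs[k] :: xs.drop (k + 1) := by
        rw [List.drop_eq_getElem_cons hk]
      have hd2 : xs.drop (k + 1) = xs[k + 1] :: xs.drop (k + 2) := by
        rw [List.drop_eq_getElem_cons hk1]
      rw [hd1, hd2, pvAdj]
      have hg1 : xs.getD (k + 1) 0 = xs[k + 1] := List.getD_eq_getElem xs 0 hk1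
      have hg0 : xs.getD k 0 = xs[k] := List.getD_eq_getElem xs 0 hk
      rw [hg1, hg0, ← hd2]
      split_ifs <;> ring
    · -- k is the last index: empty range, drop k is a singleton
      have hlen : xs.length = k + 1 := by omega
      rw [PySem.List.pyRange_one_eq_nil (by exact_mod_cast by omega)]
      rw [pvAdj_short (xs.drop k) (by simp [hlen])]
      simp

lemma pvMin_neg (ns : List Int) (h : ∀ x ∈ ns, x = 1 ∨ x = -1) (hne : ns ≠ []) :
    ((PySem.List.min? ns (fun x => x)).getD 0 < 0) ↔ (-1 : Int) ∈ ns := by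
  obtain ⟨m, hm⟩ : ∃ m, PySem.List.min? ns (fun x => x) = some m := by
    cases hmin : PySem.List.min? ns (fun x => x) with
    | none => exact absurd ((PySem.List.min?_eq_none_iff ns _).mp hmin) hne
    | some m => exact ⟨m, rfl⟩
  rw [hm]
  simp only [Option.getD_some]
  constructor
  · intro hlt
    have hmem := PySem.List.min?_mem hm
    rcases h m hmem with h1 | h1
    · exfalso; omega
    · rw [h1] at hmem; exact hmem
  · intro hmem
    have := PySem.List.min?_isMin hm (-1) hmem
    omega

lemma pvMax_pos (ns : List Int) (h : ∀ x ∈ ns, x = 1 ∨ x = -1) (hne : ns ≠ []) :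
    (0 < (PySem.List.max? ns (fun x => x)).getD 0) ↔ (1 : Int) ∈ ns := by
  obtain ⟨m, hm⟩ : ∃ m, PySem.List.max? ns (fun x => x) = some m := by
    cases hmax : PySem.List.max? ns (fun x => x) with
    | none => exact absurd ((PySem.List.max?_eq_none_iff ns _).mp hmax) hne
    | some m => exact ⟨m, rfl⟩
  rw [hm]
  simp only [Option.getD_some]
  constructor
  · intro hlt
    have hmem := PySem.List.max?_mem hm
    rcases h m hmem with h1 | h1
    · rw [h1] at hmem; exact hmem
    · exfalso; omega
  · intro hmem
    have := PySem.List.max?_isMax hm 1 hmem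
    omega

-- B's loop over the raw list equals the same loop over the nonzero sign list
lemma pvFoldB_eq (l : List Int) : ∀ st,
    l.foldl pvAltStep st = ((l.map pvSign).filter (fun v => decide (v ≠ 0))).foldl pvAltStep st := by
  induction l with
  | nil => intro st; rfl
  | cons v t ih =>
    intro st
    by_cases hv : v = 0
    · simp [hv, pvSign, pvAltStep, ih]
    · have hs : pvSign v ≠ 0 := by
        simp only [pvSign, if_neg hv]
        split_ifs <;> omega
      have hstep : pvAltStep st v = pvAltStep st (pvSign v) := by
        by_cases hp : 0 < v
        · have : pvSign v = 1 := by simp [pvSign, hv, hp]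
          simp [pvAltStep, hv, hp, this]
        · have : pvSign v = -1 := by simp [pvSign, hv, hp]
          simp [pvAltStep, hv, hp, this]
      have hf : ((v :: t).map pvSign).filter (fun v => decide (v ≠ 0))
          = pvSign v :: (t.map pvSign).filter (fun v => decide (v ≠ 0)) := by
        simp [hs]
      rw [hf, List.foldl_cons, List.foldl_cons, hstep, ih]

-- B's loop over a ±1 sign list, starting after the first nonzero sign
lemma pvFoldS (s : List Int) : ∀ (p : Int) (sp sn : Bool) (ch : Int),
    (∀ x ∈ s, x = 1 ∨ x = -1) →
    (s.foldl pvAltStep (some p, sp, sn, ch)).2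
      = (sp || decide ((1 : Int) ∈ s), sn || decide ((-1 : Int) ∈ s), ch + pvAdj (p :: s)) := by
  induction s with
  | nil => intro p sp sn ch _; simp [pvAdj_short]
  | cons a t ih =>
    intro p sp sn ch h
    have ht : ∀ x ∈ t, x = 1 ∨ x = -1 := fun x hx => h x (by simp [hx])
    rcases h a (by simp) with ha | ha
    · subst ha
      have hstep : pvAltStep (some p, sp, sn, ch) 1
          = (some 1, true, sn, if (1 : Int) ≠ p then ch + 1 else ch) := by
        simp [pvAltStep]
      rw [List.foldl_cons, hstep, ih 1 true sn _ ht]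
      rw [show pvAdj (p :: 1 :: t) = (if (1 : Int) ≠ p then 1 else 0) + pvAdj (1 :: t) from rfl]
      simp only [Prod.mk.injEq]
      refine ⟨by simp, by simp, by split_ifs <;> ring⟩
    · subst ha
      have hstep : pvAltStep (some p, sp, sn, ch) (-1)
          = (some (-1), sp, true, if (-1 : Int) ≠ p then ch + 1 else ch) := by
        simp [pvAltStep]
      rw [List.foldl_cons, hstep, ih (-1) sp true _ ht]
      rw [show pvAdj (p :: -1 :: t) = (if (-1 : Int) ≠ p then 1 else 0) + pvAdj (-1 :: t) from rfl]
      simp only [Prod.mk.injEq]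
      refine ⟨by simp, by simp, by split_ifs <;> ring⟩

-- ===== VERDICT (by name: the statement is the Claim_ definition above) =====
theorem sign_mix_score_spec : Claim_equal_sign_mix_score := by
  intro l _
  unfold Spec_sign_mix_score
  simp only [sign_mix_score, sign_mix_score_alt]
  rw [pvFoldB_eq]
  set ns := (l.map pvSign).filter (fun v => decide (v ≠ 0)) with hns
  have hpm : ∀ x ∈ ns, x = 1 ∨ x = -1 := by
    intro x hx
    rw [hns, List.mem_filter] at hx
    obtain ⟨hxm, hx0⟩ := hx
    obtain ⟨v, _, hv⟩ := List.mem_map.mp hxm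
    have hx0' : x ≠ 0 := by simpa using hx0
    have htr : x = 0 ∨ x = 1 ∨ x = -1 := by
      rw [← hv]; simp only [pvSign]; split_ifs <;> simp
    tauto
  by_cases hnil : ns = []
  · rw [hnil]; simp
  · rw [if_neg hnil]
    have hloop := pvLoopA ns ns.length 0 0 rfl
    simp only [Nat.cast_zero, zero_add, List.drop_zero] at hloop
    have hmin : decide ((PySem.List.min? ns (fun x => x)).getD 0 < 0)
        = decide ((-1 : Int) ∈ ns) := by
      simp [pvMin_neg ns hpm hnil]
    have hmax : decide (0 < (PySem.List.max? ns (fun x => x)).getD 0)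
        = decide ((1 : Int) ∈ ns) := by
      simp [pvMax_pos ns hpm hnil]
    rw [hmin, hmax, PySem.List.len_eq, hloop]
    obtain ⟨a, t, hcase⟩ := List.exists_cons_of_ne_nil hnil
    have ht : ∀ x ∈ t, x = 1 ∨ x = -1 := by
      intro x hx; exact hpm x (by rw [hcase]; simp [hx])
    rw [hcase, List.foldl_cons]
    rcases hpm a (by rw [hcase]; simp) with ha | ha
    · subst ha
      rw [show pvAltStep ((none : Option Int), false, false, (0 : Int)) 1
          = (some 1, true, false, 0) from by simp [pvAltStep]]
      rw [pvFoldS t 1 true false 0 ht]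
      simp only [Prod.mk.injEq]
      exact ⟨by simp [Bool.and_comm], by ring⟩
    · subst ha
      rw [show pvAltStep ((none : Option Int), false, false, (0 : Int)) (-1)
          = (some (-1), false, true, 0) from by simp [pvAltStep]]
      rw [pvFoldS t (-1) false true 0 ht]
      simp only [Prod.mk.injEq]
      exact ⟨by simp [Bool.and_comm], by ring⟩
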